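-- pv_equiv track=rewrite | github.com/ATursi-AI/SalesSignalAI | core/utils/scrapers/website_email.py | _rank_emails
-- ===== SOURCE A (Python) =====
-- def _rank_emails(emails):
--     """Rank emails: personal/owner names first, generic last."""
--     generic = {'info@', 'contact@', 'hello@', 'office@', 'service@', 'sales@', 'help@'}
--     personal = []
--     other = []
--
--     for email in emails:
--         local = email.split('@')[0]
--         if any(email.startswith(g) for g in generic):
--             other.append(email)
--         else:
--             personal.append(email)
--
--     return personal + other
-- ===== SOURCE B (Python) =====
-- def _rank_emails(emails):
--     """Rank emails: personal/owner names first, generic last."""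
--     generic = ('info@', 'contact@', 'hello@', 'office@', 'service@', 'sales@', 'help@')
--     return sorted(emails, key=lambda e: any(e.startswith(g) for g in generic))
-- ===== Notes on version B (the rewrite author's own statement) =====
-- stated objective: simpler
-- what changed: Replaces the explicit partition into two accumulator lists followed by concatenation with a single stable sort keyed on the boolean 'is generic-prefixed' (stable sort preserves input order within each group), and drops the unused 'local' variable.
import Mathlib
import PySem

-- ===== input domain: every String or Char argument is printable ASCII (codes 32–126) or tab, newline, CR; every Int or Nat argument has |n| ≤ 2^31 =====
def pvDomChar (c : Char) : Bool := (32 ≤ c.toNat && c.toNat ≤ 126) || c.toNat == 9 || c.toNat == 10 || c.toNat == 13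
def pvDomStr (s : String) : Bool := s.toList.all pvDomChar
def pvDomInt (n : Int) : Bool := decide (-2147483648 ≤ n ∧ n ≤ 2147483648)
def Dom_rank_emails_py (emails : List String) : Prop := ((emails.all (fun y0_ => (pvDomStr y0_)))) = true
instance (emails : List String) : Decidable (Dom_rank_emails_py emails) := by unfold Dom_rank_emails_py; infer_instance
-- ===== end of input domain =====

-- B replaces A's partition-into-two-lists-then-concatenate by one stable sort on the
-- boolean key "starts with a generic prefix" (simpler: a one-liner in Python).

-- ===== PORT A =====
def rank_emails_py_generic : List String :=
  ["info@", "contact@", "hello@", "office@", "service@", "sales@", "help@"]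

def rank_emails_py (emails : List String) : List String :=
  let generic : PySem.Set String := PySem.Set.ofList rank_emails_py_generic
  let po := emails.foldl
    (fun (acc : List String × List String) email =>
      let _local := (PySem.Str.split? email "@").bind (fun ps => PySem.List.pyGet? ps 0)  -- unused 'local' variable of A
      if generic.any (fun g => PySem.Str.startswith email g)
      then (acc.1, acc.2 ++ [email])
      else (acc.1 ++ [email], acc.2))
    ([], [])
  po.1 ++ po.2

-- ===== PORT B =====
def rank_emails_py_alt_generic : List String :=
  ["info@", "contact@", "hello@", "office@", "service@", "sales@", "help@"]

def rank_emails_py_alt_key (e : String) : Bool :=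
  rank_emails_py_alt_generic.any (fun g => PySem.Str.startswith e g)

def rank_emails_py_alt (emails : List String) : List String :=
  PySem.List.sorted emails (fun e => rank_emails_py_alt_key e)

-- ===== PRECONDITION & SPEC =====
def Spec_rank_emails_py (emails : List String) (out : List String) : Prop := out = rank_emails_py_alt emails
instance (emails : List String) (out : List String) : Decidable (Spec_rank_emails_py emails out) := by unfold Spec_rank_emails_py; infer_instance

-- ===== CLAIM (what is proved, stated in full; the proofs are below) =====
def Claim_equal_rank_emails_py : Prop := ∀ (emails : List String), Dom_rank_emails_py emails → Spec_rank_emails_py emails (rank_emails_py emails)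

-- ===== LEMMAS AND PROOFS =====

-- A's loop keeps two accumulators; its final state is (filter ¬key, filter key).
theorem rank_emails_py_foldl (rest P O : List String) :
    rest.foldl
      (fun (acc : List String × List String) email =>
        let _local := (PySem.Str.split? email "@").bind (fun ps => PySem.List.pyGet? ps 0)
        if (PySem.Set.ofList rank_emails_py_generic).any (fun g => PySem.Str.startswith email g)
        then (acc.1, acc.2 ++ [email])
        else (acc.1 ++ [email], acc.2))
      (P, O)
    = (P ++ rest.filter (fun e => !rank_emails_py_alt_key e),
       O ++ rest.filter (fun e => rank_emails_py_alt_key e)) := by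
  induction rest generalizing P O with
  | nil => simp
  | cons e rest ih =>
    have hset : (PySem.Set.ofList rank_emails_py_generic).any
        (fun g => PySem.Str.startswith e g) = rank_emails_py_alt_key e := by
      have : PySem.Set.ofList rank_emails_py_generic = rank_emails_py_alt_generic := by decide
      rw [this, rank_emails_py_alt_key]
    by_cases h : rank_emails_py_alt_key e = true
    · simp only [List.foldl_cons, hset, h, if_pos, List.filter_cons, Bool.not_true, ih]
      simp
    · simp only [Bool.not_eq_true] at h
      simp only [List.foldl_cons, hset, h, if_neg, Bool.false_eq_true, not_false_iff,
        List.filter_cons, Bool.not_false, ih]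
      simp

theorem rank_emails_py_eq_filters (emails : List String) :
    rank_emails_py emails
      = emails.filter (fun e => !rank_emails_py_alt_key e)
        ++ emails.filter (fun e => rank_emails_py_alt_key e) := by
  simp only [rank_emails_py]
  rw [rank_emails_py_foldl]
  simp

-- insertBy with a false key passes every false-key element and stops at the first true-key one
theorem insertBy_false (x : String) (hx : rank_emails_py_alt_key x = false)
    (P Q : List String) (hP : ∀ p ∈ P, rank_emails_py_alt_key p = false)
    (hQ : ∀ q ∈ Q, rank_emails_py_alt_key q = true) :
    PySem.List.insertBy (fun a b => decide (rank_emails_py_alt_key a < rank_emails_py_alt_key b)) x (P ++ Q)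
      = P ++ x :: Q := by
  induction P with
  | nil =>
    cases Q with
    | nil => simp [PySem.List.insertBy]
    | cons q qs =>
      have hq := hQ q (by simp)
      simp [PySem.List.insertBy, hx, hq]
  | cons p ps ih =>
    have hp := hP p (by simp)
    have hb : (decide (rank_emails_py_alt_key x < rank_emails_py_alt_key p)) = false := by
      simp [hx, hp]
    simp only [List.cons_append, PySem.List.insertBy, hb, Bool.false_eq_true, if_false]
    rw [ih (fun p' hp' => hP p' (by simp [hp']))]

-- insertBy with a true key appends at the end
theorem insertBy_true (x : String) (hx : rank_emails_py_alt_key x = true) (L : List String) :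
    PySem.List.insertBy (fun a b => decide (rank_emails_py_alt_key a < rank_emails_py_alt_key b)) x L
      = L ++ [x] := by
  apply PySem.List.insertBy_of_forall_not_before
  intro y _
  simp only [hx, Bool.lt_iff, decide_eq_false_iff_not]
  rintro ⟨h, -⟩
  simp at h

-- the insertion-sort loop on a two-valued key maintains a partitioned accumulator
theorem sorted_foldl_partition (rest P Q : List String)
    (hP : ∀ p ∈ P, rank_emails_py_alt_key p = false)
    (hQ : ∀ q ∈ Q, rank_emails_py_alt_key q = true) :
    rest.foldl
      (fun acc x => PySem.List.insertBy
        (fun a b => decide (rank_emails_py_alt_key a < rank_emails_py_alt_key b)) x acc)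
      (P ++ Q)
    = (P ++ rest.filter (fun e => !rank_emails_py_alt_key e))
        ++ (Q ++ rest.filter (fun e => rank_emails_py_alt_key e)) := by
  induction rest generalizing P Q with
  | nil => simp
  | cons e rest ih =>
    by_cases h : rank_emails_py_alt_key e = true
    · simp only [List.foldl_cons]
      rw [insertBy_true e h (P ++ Q), List.append_assoc]
      rw [ih P (Q ++ [e]) hP (by intro q hq; rcases List.mem_append.1 hq with h' | h'
                                 · exact hQ q h'
                                 · simp at h'; subst h'; exact h)]
      simp [h]
    · simp only [Bool.not_eq_true] at h
      simp only [List.foldl_cons]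
      rw [insertBy_false e h P Q hP hQ]
      have : P ++ e :: Q = (P ++ [e]) ++ Q := by simp
      rw [this]
      rw [ih (P ++ [e]) Q (by intro p hp; rcases List.mem_append.1 hp with h' | h'
                              · exact hP p h'
                              · simp at h'; subst h'; exact h) hQ]
      simp [h]

theorem rank_emails_py_alt_eq_filters (emails : List String) :
    rank_emails_py_alt emails
      = emails.filter (fun e => !rank_emails_py_alt_key e)
        ++ emails.filter (fun e => rank_emails_py_alt_key e) := by
  unfold rank_emails_py_alt
  rw [PySem.List.sorted_eq_foldl_insertBy]
  have := sorted_foldl_partition emails [] [] (by simp) (by simp)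
  simpa using this

-- ===== VERDICT (by name: the statement is the Claim_ definition above) =====
theorem rank_emails_py_spec : Claim_equal_rank_emails_py := by
  intro emails _
  unfold Spec_rank_emails_py
  rw [rank_emails_py_eq_filters, rank_emails_py_alt_eq_filters]
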